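-- pv_equiv track=rewrite | github.com/BreakingBoot/firness | harness_generator/data_analysis/analyze_smi.py | collect_all_deps_from_libmap
-- ===== SOURCE A (Python) =====
-- from typing import List, Dict, Tuple, Set
--
-- def collect_all_lib_deps(libmap: Dict[str, Dict[str, List[str]]], lib: str, collected_deps: Set[str]) -> Set[str]:
--     # Add the current library to the set of collected dependencies
--     collected_deps.add(lib)
--
--     # Iterate over the dependencies of the current library
--     if lib in libmap.keys():
--         for dep in libmap[lib]["dependencies"]:
--             # If the dependency is not yet collected, recursively collect its dependencies
--             if dep not in collected_deps:
--                 collect_all_lib_deps(libmap, dep, collected_deps)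
--
--     return collected_deps
--
-- def collect_all_deps_from_libmap(libraries: List[str], libmap: Dict[str, Dict[str, List[str]]]) -> Set[str]:
--     all_libs = set()
--
--     # Iterate through each library and collect all of its dependencies recursively
--     for lib in libraries:
--         for libdef in libmap.keys():
--             if lib in libdef:
--                 all_libs.add(libdef)
--                 all_libs = collect_all_lib_deps(libmap, libdef, all_libs)
--
--     return all_libs
-- ===== SOURCE B (Python) =====
-- def collect_all_deps_from_libmap(libraries, libmap):
--     all_libs = set()
--     # Same outer substring matching; dependencies are collected by an iterative
--     # depth-first traversal with an explicit stack instead of recursion.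
--     for lib in libraries:
--         for libdef in libmap:
--             if lib in libdef:
--                 stack = [libdef]
--                 while stack:
--                     node = stack.pop()
--                     if node not in all_libs:
--                         all_libs.add(node)
--                         if node in libmap:
--                             for dep in reversed(libmap[node]["dependencies"]):
--                                 stack.append(dep)
--     return all_libs
-- ===== Notes on version B (the rewrite author's own statement) =====
-- stated objective: alternative
-- what changed: The recursive helper collect_all_lib_deps is replaced by an iterative depth-first traversal with an explicit stack (pop a node, skip if already collected, otherwise mark it and push its dependencies in reverse), eliminating recursion; the outer substring-matching loops are unchanged.
-- outside the precondition, e.g. on collect_all_deps_from_libmap([], {'a': {'dependencies': ['b']}, 'b': {}}): A returns set(), B returns set()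
import Mathlib
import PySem

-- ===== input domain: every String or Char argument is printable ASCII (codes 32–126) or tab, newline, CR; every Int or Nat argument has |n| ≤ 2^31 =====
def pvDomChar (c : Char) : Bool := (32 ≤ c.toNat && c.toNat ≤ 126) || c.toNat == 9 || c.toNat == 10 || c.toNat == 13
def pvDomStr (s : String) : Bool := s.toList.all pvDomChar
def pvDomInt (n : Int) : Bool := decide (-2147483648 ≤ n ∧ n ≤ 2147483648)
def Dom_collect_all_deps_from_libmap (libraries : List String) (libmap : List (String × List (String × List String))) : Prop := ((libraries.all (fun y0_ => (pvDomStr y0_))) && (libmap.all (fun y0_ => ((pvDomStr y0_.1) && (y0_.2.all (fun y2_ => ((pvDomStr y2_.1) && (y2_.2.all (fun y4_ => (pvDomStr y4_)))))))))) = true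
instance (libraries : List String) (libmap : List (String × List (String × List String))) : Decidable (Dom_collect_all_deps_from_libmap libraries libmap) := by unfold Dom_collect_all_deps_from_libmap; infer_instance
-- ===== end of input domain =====

-- B replaces A's recursive dependency collector by an iterative explicit-stack DFS (same result set, no recursion); objective: alternative.

-- ===== PORT A =====
-- Literal port of the recursive helper collect_all_lib_deps.  The fuel argument only
-- guards totality: it is checked and decremented at the recursive call and the caller
-- supplies libmap.length + 1, which is never exhausted (the equivalence proof below
-- shows the value with this fuel equals the fuel-free stack DFS).  The inner
-- ["dependencies"] lookup is ported with getD []; Pre_ guarantees the key is present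
-- for every entry the traversal can reach, so this is exact on Pre_.
mutual
def collect_all_lib_deps (libmap : List (String × List (String × List String))) : Nat → String → PySem.Set String → PySem.Set String
  | fuel, lib, collected =>
    let collected := PySem.Set.add collected lib
    if (PySem.Dict.mk libmap).contains lib then
      pvDepLoopA libmap fuel
        (PySem.Dict.getD (PySem.Dict.mk ((PySem.Dict.mk libmap).getD lib [])) "dependencies" [])
        collected
    else collected
termination_by fuel _ _ => (fuel, 1, 0)
def pvDepLoopA (libmap : List (String × List (String × List String))) : Nat → List String → PySem.Set String → PySem.Set String
  | _, [], collected => collected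
  | 0, _ :: rest, collected => pvDepLoopA libmap 0 rest collected      -- fuel guard, unreachable with the fuel supplied
  | f + 1, dep :: rest, collected =>
    pvDepLoopA libmap (f + 1) rest
      (if PySem.Set.contains collected dep then collected
       else collect_all_lib_deps libmap f dep collected)
termination_by fuel ds _ => (fuel, 0, ds.length)
end

def collect_all_deps_from_libmap (libraries : List String) (libmap : List (String × List (String × List String))) : List String :=
  libraries.foldl (fun all_libs lib =>
    ((PySem.Dict.mk libmap).keys).foldl (fun all_libs libdef =>
      if PySem.Str.isIn lib libdef then
        collect_all_lib_deps libmap (libmap.length + 1) libdef (PySem.Set.add all_libs libdef)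
      else all_libs) all_libs) PySem.Set.empty

-- ===== PORT B =====
-- pvUniverse/termination measure: every node ever pushed is a key or a listed dependency.
def pvUniverse (libmap : List (String × List (String × List String))) : List String :=
  libmap.flatMap (fun p => p.1 :: PySem.Dict.getD (PySem.Dict.mk p.2) "dependencies" [])

def pvNotIn (c : PySem.Set String) (x : String) : Bool := !(PySem.Set.contains c x)

-- helper lemmas used only by pvDfsLoop's termination argument
theorem pvFilterLenMono {α : Type} (l : List α) (p q : α → Bool)
    (h : ∀ x ∈ l, p x = true → q x = true) : (l.filter p).length ≤ (l.filter q).length := by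
  induction l with
  | nil => simp
  | cons a l ih =>
    have ih' := ih (fun x hx => h x (List.mem_cons_of_mem _ hx))
    by_cases hp : p a = true
    · simp [hp, h a (List.mem_cons_self) hp]; omega
    · simp only [List.filter_cons, Bool.not_eq_true] at *
      rw [hp]
      cases hq : q a <;> simp <;> omega

theorem pvFilterLenStrict {α : Type} (l : List α) (p q : α → Bool) (a : α)
    (ha : a ∈ l) (hqa : q a = true) (hpa : p a = false)
    (h : ∀ x ∈ l, p x = true → q x = true) : (l.filter p).length < (l.filter q).length := by
  obtain ⟨s, t, rfl⟩ := List.append_of_mem ha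
  have hs := pvFilterLenMono s p q (fun x hx => h x (by simp [hx]))
  have ht := pvFilterLenMono t p q (fun x hx => h x (by simp [hx]))
  simp [List.filter_append, hpa, hqa]
  omega

theorem pvMemUniverse (libmap : List (String × List (String × List String))) (node : String)
    (d : List (String × List String)) (h : (PySem.Dict.mk libmap).get? node = some d) :
    node ∈ pvUniverse libmap ∧
      (PySem.Dict.getD (PySem.Dict.mk d) "dependencies" []).length ≤ (pvUniverse libmap).length := by
  have hmem : (node, d) ∈ libmap := PySem.Dict.mem_items_of_get?_eq_some (d := PySem.Dict.mk libmap) h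
  constructor
  · exact List.mem_flatMap.mpr ⟨(node, d), hmem, by simp⟩
  · obtain ⟨s, t, rfl⟩ := List.append_of_mem hmem
    simp [pvUniverse, List.flatMap_append]
    omega

theorem pvNotInMono (c : PySem.Set String) (node x : String)
    (hx : pvNotIn (PySem.Set.add c node) x = true) : pvNotIn c x = true := by
  simp only [pvNotIn, Bool.not_eq_true', PySem.Set.contains_eq_listContains] at *
  simp only [List.contains_eq_mem, decide_eq_false_iff_not] at *
  intro hmem
  exact hx (by simp [PySem.Set.mem_add, hmem])

-- B's while-loop: pop a node from the stack (head = top of stack); if unvisited, mark it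
-- and push its dependencies in reversed order (= prepend them in order on a head-top stack).
def pvDfsLoop (libmap : List (String × List (String × List String))) : List String → PySem.Set String → PySem.Set String
  | [], all_libs => all_libs
  | node :: stack, all_libs =>
    if hv : PySem.Set.contains all_libs node then pvDfsLoop libmap stack all_libs
    else
      let all_libs' := PySem.Set.add all_libs node
      match hm : (PySem.Dict.mk libmap).get? node with
      | none => pvDfsLoop libmap stack all_libs'
      | some d => pvDfsLoop libmap (PySem.Dict.getD (PySem.Dict.mk d) "dependencies" [] ++ stack) all_libs'
termination_by stack c => ((pvUniverse libmap).filter (pvNotIn c)).length * ((pvUniverse libmap).length + 1) + stack.length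
decreasing_by
  · simp only [List.length_cons]; omega
  · have hle := pvFilterLenMono (pvUniverse libmap) (pvNotIn (PySem.Set.add all_libs node)) (pvNotIn all_libs) (fun x _ => pvNotInMono _ _ _)
    have hmul := Nat.mul_le_mul_right ((pvUniverse libmap).length + 1) hle
    simp only [List.length_cons]
    omega
  · have hU := pvMemUniverse libmap node d hm
    have hcf : PySem.Set.contains all_libs node = false := by
      revert hv; cases PySem.Set.contains all_libs node <;> simp
    have hca : PySem.Set.contains (PySem.Set.add all_libs node) node = true := by
      simp [PySem.Set.contains_eq_listContains, List.contains_eq_mem, PySem.Set.mem_add]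
    have hlt := pvFilterLenStrict (pvUniverse libmap) (pvNotIn (PySem.Set.add all_libs node)) (pvNotIn all_libs) node hU.1
      (by simp only [pvNotIn]; rw [hcf]; rfl) (by simp only [pvNotIn]; rw [hca]; rfl)
      (fun x _ => pvNotInMono _ _ _)
    have hmul := Nat.mul_le_mul_right ((pvUniverse libmap).length + 1) hlt
    rw [Nat.succ_mul] at hmul
    simp only [List.length_append, List.length_cons]
    omega

def collect_all_deps_from_libmap_alt (libraries : List String) (libmap : List (String × List (String × List String))) : List String :=
  libraries.foldl (fun all_libs lib =>
    ((PySem.Dict.mk libmap).keys).foldl (fun all_libs libdef =>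
      if PySem.Str.isIn lib libdef then
        pvDfsLoop libmap [libdef] all_libs
      else all_libs) all_libs) PySem.Set.empty

-- ===== PRECONDITION & SPEC =====
-- Pre_ excludes inputs on which a substring-matched or depended-upon libmap entry lacks a
-- "dependencies" key: there A raises KeyError.  This slightly overapproximates the set of
-- entries the traversal actually reaches, so a few inputs where A still returns (the
-- malformed entry is listed as a dependency but never visited) are excluded as well.
def Pre_collect_all_deps_from_libmap (libraries : List String) (libmap : List (String × List (String × List String))) : Prop :=
  ∀ p ∈ libmap,
    ((∃ lib ∈ libraries, PySem.Str.isIn lib p.1 = true) ∨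
     (∃ q ∈ libmap, p.1 ∈ PySem.Dict.getD (PySem.Dict.mk q.2) "dependencies" [])) →
    ((PySem.Dict.mk p.2).get? "dependencies").isSome = true
instance (libraries : List String) (libmap : List (String × List (String × List String))) : Decidable (Pre_collect_all_deps_from_libmap libraries libmap) := by unfold Pre_collect_all_deps_from_libmap; infer_instance

def pvWitness_collect_all_deps_from_libmap : List String × (List (String × List (String × List String))) :=
  (["a"], [("abc", [("dependencies", ["x"])])])

def Spec_collect_all_deps_from_libmap (libraries : List String) (libmap : List (String × List (String × List String))) (out : List String) : Prop := out = collect_all_deps_from_libmap_alt libraries libmap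
instance (libraries : List String) (libmap : List (String × List (String × List String))) (out : List String) : Decidable (Spec_collect_all_deps_from_libmap libraries libmap out) := by unfold Spec_collect_all_deps_from_libmap; infer_instance

-- ===== CLAIM (what is proved, stated in full; the proofs are below) =====
def Claim_equal_collect_all_deps_from_libmap : Prop := ∀ (libraries : List String) (libmap : List (String × List (String × List String))), Dom_collect_all_deps_from_libmap libraries libmap → Pre_collect_all_deps_from_libmap libraries libmap → Spec_collect_all_deps_from_libmap libraries libmap (collect_all_deps_from_libmap libraries libmap)

-- ===== LEMMAS AND PROOFS =====

-- number of dict keys not yet collected (fuel bound for A's recursion)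
def pvRem (libmap : List (String × List (String × List String))) (c : PySem.Set String) : Nat :=
  (((PySem.Dict.mk libmap).keys).filter (fun k => !(PySem.Set.contains c k))).length

-- c is closed under the dependency relation of libmap
def pvClosed (libmap : List (String × List (String × List String))) (c : PySem.Set String) : Prop :=
  ∀ x ∈ c, ∀ d, (PySem.Dict.mk libmap).get? x = some d →
    ∀ dep ∈ PySem.Dict.getD (PySem.Dict.mk d) "dependencies" [], dep ∈ c

theorem pvRem_mono (libmap : List (String × List (String × List String))) (c c' : PySem.Set String)
    (h : ∀ x ∈ c, x ∈ c') : pvRem libmap c' ≤ pvRem libmap c := by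
  apply pvFilterLenMono
  intro x _ hx
  simp only [Bool.not_eq_true', PySem.Set.contains_eq_listContains, List.contains_eq_mem,
    decide_eq_false_iff_not] at *
  exact fun hm => hx (h x hm)

theorem pvRem_le (libmap : List (String × List (String × List String))) (c : PySem.Set String) :
    pvRem libmap c ≤ libmap.length := by
  have h := List.length_filter_le (fun k => !(PySem.Set.contains c k)) ((PySem.Dict.mk libmap).keys)
  calc pvRem libmap c ≤ ((PySem.Dict.mk libmap).keys).length := h
    _ = libmap.length := by simp [PySem.Dict.keys]

theorem pvRem_zero_mem (libmap : List (String × List (String × List String))) (c : PySem.Set String)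
    (k : String) (h : pvRem libmap c = 0) (hk : k ∈ (PySem.Dict.mk libmap).keys) : k ∈ c := by
  by_contra hx
  have hmem : k ∈ ((PySem.Dict.mk libmap).keys).filter (fun k => !(PySem.Set.contains c k)) := by
    apply List.mem_filter.mpr
    refine ⟨hk, ?_⟩
    simp only [Bool.not_eq_true', PySem.Set.contains_eq_listContains, List.contains_eq_mem,
      decide_eq_false_iff_not]
    exact hx
  have := List.length_pos_of_mem hmem
  unfold pvRem at h
  omega

theorem pvRem_lt (libmap : List (String × List (String × List String))) (c : PySem.Set String)
    (node : String) (hk : node ∈ (PySem.Dict.mk libmap).keys) (hn : node ∉ c) :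
    pvRem libmap (PySem.Set.add c node) < pvRem libmap c := by
  apply pvFilterLenStrict _ _ _ node hk
  · simp only [Bool.not_eq_true', PySem.Set.contains_eq_listContains, List.contains_eq_mem,
      decide_eq_false_iff_not]
    exact hn
  · simp [PySem.Set.contains_eq_listContains, List.contains_eq_mem, PySem.Set.mem_add]
  · intro x _ hx
    simp only [Bool.not_eq_true', PySem.Set.contains_eq_listContains, List.contains_eq_mem,
      decide_eq_false_iff_not] at *
    exact fun hm => hx (by simp [PySem.Set.mem_add, hm])

-- A's collector only ever adds elements
theorem pvMonoA (libmap : List (String × List (String × List String))) (fuel : Nat) :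
    (∀ lib c x, x ∈ c → x ∈ collect_all_lib_deps libmap fuel lib c) ∧
    (∀ ds c x, x ∈ c → x ∈ pvDepLoopA libmap fuel ds c) := by
  induction fuel with
  | zero =>
    have hl : ∀ ds c x, x ∈ c → x ∈ pvDepLoopA libmap 0 ds c := by
      intro ds
      induction ds with
      | nil => intro c x hx; simpa [pvDepLoopA] using hx
      | cons dep rest ih =>
        intro c x hx
        simp only [pvDepLoopA]
        exact ih c x hx
    refine ⟨?_, hl⟩
    intro lib c x hx
    simp only [collect_all_lib_deps]
    split
    · exact hl _ _ _ (by simp [PySem.Set.mem_add, hx])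
    · simp [PySem.Set.mem_add, hx]
  | succ f ih =>
    have hl : ∀ ds c x, x ∈ c → x ∈ pvDepLoopA libmap (f + 1) ds c := by
      intro ds
      induction ds with
      | nil => intro c x hx; simpa [pvDepLoopA] using hx
      | cons dep rest ihr =>
        intro c x hx
        simp only [pvDepLoopA]
        apply ihr
        split
        · exact hx
        · exact (ih.1) dep c x hx
    refine ⟨?_, hl⟩
    intro lib c x hx
    simp only [collect_all_lib_deps]
    split
    · exact hl _ _ _ (by simp [PySem.Set.mem_add, hx])
    · simp [PySem.Set.mem_add, hx]

-- A's dependency loop is the identity when every dependency is already collected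
theorem pvSkipA (libmap : List (String × List (String × List String))) (fuel : Nat) :
    ∀ ds c, (∀ dep ∈ ds, dep ∈ c) → pvDepLoopA libmap fuel ds c = c := by
  intro ds
  induction ds with
  | nil => intro c _; cases fuel <;> simp [pvDepLoopA]
  | cons dep rest ih =>
    intro c h
    have hdep : PySem.Set.contains c dep = true := by
      simp [PySem.Set.contains_eq_listContains, List.contains_eq_mem]
      exact h dep (by simp)
    cases fuel with
    | zero => simp only [pvDepLoopA]; exact ih c (fun x hx => h x (by simp [hx]))
    | succ f =>
      simp only [pvDepLoopA, hdep, if_pos]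
      exact ih c (fun x hx => h x (by simp [hx]))

-- MAIN LEMMA: the explicit-stack DFS processes the top node exactly like A's recursive
-- collector (and a run of pushed dependencies exactly like A's dependency loop),
-- provided the fuel exceeds the number of not-yet-collected keys.
theorem pvMain (libmap : List (String × List (String × List String))) (fuel : Nat) :
    (∀ node c stack, node ∉ c → pvRem libmap c ≤ fuel →
      pvDfsLoop libmap (node :: stack) c = pvDfsLoop libmap stack (collect_all_lib_deps libmap fuel node c)) ∧
    (∀ ds c stack, pvRem libmap c + 1 ≤ fuel →
      pvDfsLoop libmap (ds ++ stack) c = pvDfsLoop libmap stack (pvDepLoopA libmap fuel ds c)) := by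
  induction fuel with
  | zero =>
    constructor
    · intro node c stack hnode hrem
      have hncont : PySem.Set.contains c node = false := by
        simp [PySem.Set.contains_eq_listContains, List.contains_eq_mem]; exact hnode
      have hkey : (PySem.Dict.mk libmap).contains node = false := by
        by_contra h
        have hk : node ∈ (PySem.Dict.mk libmap).keys := by
          have := PySem.Dict.contains_eq_decide_mem_keys (d := PySem.Dict.mk libmap) (k := node)
          rw [this] at h
          simpa using h
        exact hnode (pvRem_zero_mem libmap c node (by omega) hk)
      have hget : (PySem.Dict.mk libmap).get? node = none := by
        have := PySem.Dict.contains_eq_isSome_get? (d := PySem.Dict.mk libmap) (k := node)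
        rw [this] at hkey
        exact Option.not_isSome_iff_eq_none.mp (by simp [hkey])
      have hL : pvDfsLoop libmap (node :: stack) c = pvDfsLoop libmap stack (PySem.Set.add c node) := by
        simp only [pvDfsLoop, hncont, Bool.false_eq_true, reduceDIte]
        split <;> simp_all
      rw [hL]
      simp only [collect_all_lib_deps, hkey, Bool.false_eq_true, reduceIte]
    · intro ds c stack h; omega
  | succ f ih =>
    have hS2 : ∀ ds c stack, pvRem libmap c + 1 ≤ f + 1 →
        pvDfsLoop libmap (ds ++ stack) c = pvDfsLoop libmap stack (pvDepLoopA libmap (f + 1) ds c) := by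
      intro ds
      induction ds with
      | nil => intro c stack _; simp [pvDepLoopA]
      | cons dep rest ihr =>
        intro c stack h
        by_cases hdep : dep ∈ c
        · have hcont : PySem.Set.contains c dep = true := by
            simp [PySem.Set.contains_eq_listContains, List.contains_eq_mem]; exact hdep
          have l1 : pvDfsLoop libmap ((dep :: rest) ++ stack) c = pvDfsLoop libmap (rest ++ stack) c := by
            simp only [List.cons_append, pvDfsLoop, hcont, reduceDIte]
          rw [l1, ihr c stack h]
          simp only [pvDepLoopA, hcont, if_pos]
        · have hcont : PySem.Set.contains c dep = false := by
            simp [PySem.Set.contains_eq_listContains, List.contains_eq_mem]; exact hdep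
          have l1 : pvDfsLoop libmap ((dep :: rest) ++ stack) c
              = pvDfsLoop libmap (rest ++ stack) (collect_all_lib_deps libmap f dep c) := by
            rw [List.cons_append]
            exact ih.1 dep c (rest ++ stack) hdep (by omega)
          have hsub : pvRem libmap (collect_all_lib_deps libmap f dep c) ≤ pvRem libmap c :=
            pvRem_mono _ _ _ (fun x hx => (pvMonoA libmap f).1 dep c x hx)
          rw [l1, ihr _ stack (by omega)]
          simp only [pvDepLoopA, hcont, Bool.false_eq_true, reduceIte]
    refine ⟨?_, hS2⟩
    intro node c stack hnode hrem
    have hncont : PySem.Set.contains c node = false := by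
      simp [PySem.Set.contains_eq_listContains, List.contains_eq_mem]; exact hnode
    cases hm : (PySem.Dict.mk libmap).get? node with
    | none =>
      have hkey : (PySem.Dict.mk libmap).contains node = false := by
        rw [PySem.Dict.contains_eq_isSome_get?, hm]; rfl
      have hL : pvDfsLoop libmap (node :: stack) c = pvDfsLoop libmap stack (PySem.Set.add c node) := by
        simp only [pvDfsLoop, hncont, Bool.false_eq_true, reduceDIte]
        split <;> simp_all
      rw [hL]
      simp only [collect_all_lib_deps, hkey, Bool.false_eq_true, reduceIte]
    | some d =>
      have hkey : (PySem.Dict.mk libmap).contains node = true := by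
        rw [PySem.Dict.contains_eq_isSome_get?, hm]; rfl
      have hkmem : node ∈ (PySem.Dict.mk libmap).keys := by
        have := PySem.Dict.contains_eq_decide_mem_keys (d := PySem.Dict.mk libmap) (k := node)
        rw [this] at hkey
        simpa using hkey
      have hgetD : (PySem.Dict.mk libmap).getD node [] = d := by
        rw [PySem.Dict.getD_eq_get?_getD, hm]; rfl
      have hfuel : pvRem libmap (PySem.Set.add c node) + 1 ≤ f + 1 := by
        have := pvRem_lt libmap c node hkmem hnode
        omega
      have hstep := hS2 (PySem.Dict.getD (PySem.Dict.mk d) "dependencies" []) (PySem.Set.add c node) stack hfuel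
      have hL : pvDfsLoop libmap (node :: stack) c
          = pvDfsLoop libmap (PySem.Dict.getD (PySem.Dict.mk d) "dependencies" [] ++ stack) (PySem.Set.add c node) := by
        simp only [pvDfsLoop, hncont, Bool.false_eq_true, reduceDIte]
        split <;> simp_all
      rw [hL, hstep]
      simp only [collect_all_lib_deps, hkey, if_pos, hgetD]

-- the stack DFS returns a dependency-closed set
theorem pvDfsClosed (libmap : List (String × List (String × List String))) :
    ∀ stack c,
      (∀ x ∈ c, ∀ d, (PySem.Dict.mk libmap).get? x = some d →
        ∀ dep ∈ PySem.Dict.getD (PySem.Dict.mk d) "dependencies" [], dep ∈ c ∨ dep ∈ stack) →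
      pvClosed libmap (pvDfsLoop libmap stack c) := by
  intro stack c
  induction stack, c using pvDfsLoop.induct libmap with
  | case1 c =>
    intro h
    rw [show pvDfsLoop libmap [] c = c by simp [pvDfsLoop]]
    intro x hx d hd dep hdep
    rcases h x hx d hd dep hdep with h' | h'
    · exact h'
    · simp at h'
  | case2 node stack c hv ih =>
    intro h
    have hnode : node ∈ c := by
      have := (PySem.Set.contains_iff c node).mp hv
      exact this
    rw [show pvDfsLoop libmap (node :: stack) c = pvDfsLoop libmap stack c by
      simp only [pvDfsLoop, hv, reduceDIte]]
    apply ih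
    intro x hx d hd dep hdep
    rcases h x hx d hd dep hdep with h' | h'
    · exact Or.inl h'
    · rcases List.mem_cons.mp h' with rfl | h''
      · exact Or.inl hnode
      · exact Or.inr h''
  | case3 node stack c hv _ hm ih =>
    intro h
    rw [show pvDfsLoop libmap (node :: stack) c = pvDfsLoop libmap stack (PySem.Set.add c node) by
      simp only [pvDfsLoop, hv, Bool.false_eq_true, reduceDIte]
      split <;> simp_all]
    apply ih
    intro x hx d hd dep hdep
    rcases (PySem.Set.mem_add _ _ _).mp hx with hx' | rfl
    · rcases h x hx' d hd dep hdep with h' | h'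
      · exact Or.inl ((PySem.Set.mem_add _ _ _).mpr (Or.inl h'))
      · rcases List.mem_cons.mp h' with rfl | h''
        · exact Or.inl ((PySem.Set.mem_add _ _ _).mpr (Or.inr rfl))
        · exact Or.inr h''
    · rw [hm] at hd; cases hd
  | case4 node stack c hv _ d hm ih =>
    intro h
    rw [show pvDfsLoop libmap (node :: stack) c
        = pvDfsLoop libmap (PySem.Dict.getD (PySem.Dict.mk d) "dependencies" [] ++ stack) (PySem.Set.add c node) by
      simp only [pvDfsLoop, hv, Bool.false_eq_true, reduceDIte]
      split <;> simp_all]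
    apply ih
    intro x hx d' hd' dep hdep
    rcases (PySem.Set.mem_add _ _ _).mp hx with hx' | rfl
    · rcases h x hx' d' hd' dep hdep with h' | h'
      · exact Or.inl ((PySem.Set.mem_add _ _ _).mpr (Or.inl h'))
      · rcases List.mem_cons.mp h' with rfl | h''
        · exact Or.inl ((PySem.Set.mem_add _ _ _).mpr (Or.inr rfl))
        · exact Or.inr (by simp [h''])
    · rw [hm] at hd'
      cases hd'
      exact Or.inr (by simp [hdep])

-- one matched key: A's recursive collection equals B's stack DFS (on a closed set)
theorem pvStepEq (libmap : List (String × List (String × List String))) (c : PySem.Set String)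
    (libdef : String) (hc : pvClosed libmap c) :
    collect_all_lib_deps libmap (libmap.length + 1) libdef (PySem.Set.add c libdef)
      = pvDfsLoop libmap [libdef] c := by
  by_cases hmem : libdef ∈ c
  · have hadd : PySem.Set.add c libdef = c := PySem.Set.add_of_mem hmem
    have hcont : PySem.Set.contains c libdef = true := by
      simp [PySem.Set.contains_eq_listContains, List.contains_eq_mem]; exact hmem
    rw [hadd]
    rw [show pvDfsLoop libmap [libdef] c = c by simp only [pvDfsLoop, hcont, reduceDIte]]
    simp only [collect_all_lib_deps, hadd]
    split
    · next hkey =>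
      cases hm : (PySem.Dict.mk libmap).get? libdef with
      | none => rw [PySem.Dict.contains_eq_isSome_get?, hm] at hkey; simp at hkey
      | some d =>
        have hgetD : (PySem.Dict.mk libmap).getD libdef [] = d := by
          rw [PySem.Dict.getD_eq_get?_getD, hm]; rfl
        rw [hgetD]
        exact pvSkipA libmap _ _ c (fun dep hdep => hc libdef hmem d hm dep hdep)
    · rfl
  · have hcont : PySem.Set.contains c libdef = false := by
      simp [PySem.Set.contains_eq_listContains, List.contains_eq_mem]; exact hmem
    have haddmem : libdef ∈ PySem.Set.add c libdef := (PySem.Set.mem_add _ _ _).mpr (Or.inr rfl)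
    have hadd2 : PySem.Set.add (PySem.Set.add c libdef) libdef = PySem.Set.add c libdef :=
      PySem.Set.add_of_mem haddmem
    cases hm : (PySem.Dict.mk libmap).get? libdef with
    | none =>
      have hkey : (PySem.Dict.mk libmap).contains libdef = false := by
        rw [PySem.Dict.contains_eq_isSome_get?, hm]; rfl
      rw [show pvDfsLoop libmap [libdef] c = pvDfsLoop libmap [] (PySem.Set.add c libdef) by
        simp only [pvDfsLoop, hcont, Bool.false_eq_true, reduceDIte]
        split <;> simp_all]
      simp only [collect_all_lib_deps, hadd2, hkey, Bool.false_eq_true, reduceIte, pvDfsLoop]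
    | some d =>
      have hkey : (PySem.Dict.mk libmap).contains libdef = true := by
        rw [PySem.Dict.contains_eq_isSome_get?, hm]; rfl
      have hgetD : (PySem.Dict.mk libmap).getD libdef [] = d := by
          rw [PySem.Dict.getD_eq_get?_getD, hm]; rfl
      have hfuel : pvRem libmap (PySem.Set.add c libdef) + 1 ≤ libmap.length + 1 := by
        have := pvRem_le libmap (PySem.Set.add c libdef)
        omega
      have hmain := (pvMain libmap (libmap.length + 1)).2
        (PySem.Dict.getD (PySem.Dict.mk d) "dependencies" []) (PySem.Set.add c libdef) [] hfuel
      rw [show pvDfsLoop libmap [libdef] c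
          = pvDfsLoop libmap (PySem.Dict.getD (PySem.Dict.mk d) "dependencies" [] ++ []) (PySem.Set.add c libdef) by
        simp only [pvDfsLoop, hcont, Bool.false_eq_true, reduceDIte]
        split <;> simp_all]
      rw [hmain]
      simp only [collect_all_lib_deps, hadd2, hkey, if_pos, hgetD, pvDfsLoop]

-- the per-library inner fold over the dict keys: values agree and stay closed
theorem pvInner (libmap : List (String × List (String × List String))) (lib : String) :
    ∀ (kds : List String) (c : PySem.Set String), pvClosed libmap c →
      (kds.foldl (fun all_libs libdef =>
          if PySem.Str.isIn lib libdef then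
            collect_all_lib_deps libmap (libmap.length + 1) libdef (PySem.Set.add all_libs libdef)
          else all_libs) c
        = kds.foldl (fun all_libs libdef =>
          if PySem.Str.isIn lib libdef then pvDfsLoop libmap [libdef] all_libs
          else all_libs) c)
      ∧ pvClosed libmap (kds.foldl (fun all_libs libdef =>
          if PySem.Str.isIn lib libdef then pvDfsLoop libmap [libdef] all_libs
          else all_libs) c) := by
  intro kds
  induction kds with
  | nil => intro c hc; exact ⟨rfl, hc⟩
  | cons libdef rest ih =>
    intro c hc
    by_cases hin : PySem.Str.isIn lib libdef = true
    · have hclosed' : pvClosed libmap (pvDfsLoop libmap [libdef] c) := by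
        apply pvDfsClosed
        intro x hx d hd dep hdep
        exact Or.inl (hc x hx d hd dep hdep)
      have heq := pvStepEq libmap c libdef hc
      simp only [List.foldl_cons, hin, if_pos, heq]
      exact ih _ hclosed'
    · simp only [List.foldl_cons, hin, Bool.false_eq_true, reduceIte]
      exact ih c hc

-- the outer fold over libraries
theorem pvOuter (libmap : List (String × List (String × List String))) :
    ∀ (libs : List String) (c : PySem.Set String), pvClosed libmap c →
      libs.foldl (fun all_libs lib =>
          ((PySem.Dict.mk libmap).keys).foldl (fun all_libs libdef =>
            if PySem.Str.isIn lib libdef then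
              collect_all_lib_deps libmap (libmap.length + 1) libdef (PySem.Set.add all_libs libdef)
            else all_libs) all_libs) c
        = libs.foldl (fun all_libs lib =>
          ((PySem.Dict.mk libmap).keys).foldl (fun all_libs libdef =>
            if PySem.Str.isIn lib libdef then pvDfsLoop libmap [libdef] all_libs
            else all_libs) all_libs) c := by
  intro libs
  induction libs with
  | nil => intro c _; rfl
  | cons lib rest ih =>
    intro c hc
    have h := pvInner libmap lib ((PySem.Dict.mk libmap).keys) c hc
    simp only [List.foldl_cons, h.1]
    exact ih _ h.2

-- ===== VERDICT (by name: the statement is the Claim_ definition above) =====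
theorem collect_all_deps_from_libmap_spec : Claim_equal_collect_all_deps_from_libmap := by
  intro libraries libmap _ _
  unfold Spec_collect_all_deps_from_libmap collect_all_deps_from_libmap collect_all_deps_from_libmap_alt
  exact pvOuter libmap libraries PySem.Set.empty (by intro x hx; cases hx)
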